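-- pv_equiv track=rewrite | github.com/Jaeookk/algorithm | 구현/[1차] 프랜즈4블록.py | solution
-- ===== SOURCE A (Python) =====
-- def check_block(m,n,board):
--     graph = [[1]*n for _ in range(m)]
--     for i in range(1,m):
--         for j in range(1,n):
--             if board[i][j] == "": continue
--             if (board[i-1][j-1] == board[i][j]
--                 and board[i][j-1] == board[i][j]
--                 and board[i-1][j] == board[i][j]):
--                 graph[i][j] = min(graph[i-1][j-1], graph[i][j-1], graph[i-1][j]) + 1
--     return graph
--
-- def remove_block(m,n,board,graph):
--     cnt = []
--     for i in range(1,m):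
--         for j in range(1,n):
--             if graph[i][j] >= 2:
--                 board[i-1][j-1], board[i-1][j], board[i][j-1], board[i][j] = "", "", "", ""
--                 cnt.extend([(i-1,j-1),(i-1,j),(i,j-1),(i,j)])
--     return board, len(set(cnt))
--
-- def fill_empty(m,n,board):
--     for j in range(n):
--         point = []
--         for i in range(m-1,-1,-1):
--             if not point:
--                 if board[i][j] == "":
--                     point.append((i,j))
--             else:
--                 if board[i][j] == "":
--                     point.append((i,j))
--                 else:
--                     x, y = point.pop(0)
--                     board[x][y] = board[i][j] # 가장 밑에 처음 나왔던 빈칸으로 옮겨줌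
--                     board[i][j] = ""  # 옮기고 난 부분은 빈칸으로 변경. 이 i,j 좌표도 point에 추가해줘야 한다
--                     point.append((i,j))
--     return board
--
-- def solution(m, n, board):
--     answer = 0
--     new_board = [[0]*n for _ in range(m)]
--
--     for i in range(m):
--         for j in range(n):
--             new_board[i][j] = board[i][j]
--
--     while True:
--         graph = check_block(m,n,new_board)
--         new_board, count = remove_block(m,n,new_board, graph)
--         if count == 0: break
--         new_board = fill_empty(m,n,new_board)
--         answer += count
--
--     return answer
-- ===== SOURCE B (Python) =====
-- def solution(m, n, board):
--     # test the 2x2 squares directly (no DP table); gravity by rebuilding each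
--     # column bottom-aligned instead of the queue-of-empty-slots loop.
--     grid = [[board[i][j] for j in range(n)] for i in range(m)]
--     answer = 0
--     while True:
--         to_clear = set()
--         for i in range(1, m):
--             for j in range(1, n):
--                 v = grid[i][j]
--                 if v and grid[i - 1][j] == v and grid[i][j - 1] == v and grid[i - 1][j - 1] == v:
--                     to_clear.add((i, j))
--                     to_clear.add((i - 1, j))
--                     to_clear.add((i, j - 1))
--                     to_clear.add((i - 1, j - 1))
--         if not to_clear:
--             break
--         answer += len(to_clear)
--         for (i, j) in to_clear:
--             grid[i][j] = ""
--         for j in range(n):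
--             col = [grid[i][j] for i in range(m) if grid[i][j]]
--             full = [""] * (m - len(col)) + col
--             for i in range(m):
--                 grid[i][j] = full[i]
--     return answer
-- ===== Notes on version B (the rewrite author's own statement) =====
-- stated objective: simpler
-- what changed: B drops the DP graph table and tests each 2x2 square directly while collecting the cells to clear in one set, and replaces the queue-of-empty-slots gravity with rebuilding every column from its non-empty cells bottom-aligned.
import Mathlib
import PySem

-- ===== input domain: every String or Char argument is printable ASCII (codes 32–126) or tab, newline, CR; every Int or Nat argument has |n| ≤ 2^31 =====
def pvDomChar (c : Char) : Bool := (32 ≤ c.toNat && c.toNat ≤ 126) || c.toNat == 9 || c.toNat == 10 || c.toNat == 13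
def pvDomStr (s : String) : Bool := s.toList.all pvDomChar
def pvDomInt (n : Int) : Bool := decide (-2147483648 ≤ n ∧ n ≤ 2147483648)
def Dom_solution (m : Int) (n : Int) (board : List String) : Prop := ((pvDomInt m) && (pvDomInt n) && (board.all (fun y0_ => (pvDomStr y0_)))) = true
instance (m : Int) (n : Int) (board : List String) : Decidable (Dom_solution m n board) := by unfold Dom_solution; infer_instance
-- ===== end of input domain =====

-- B replaces A's DP `graph` table by a direct 2x2 test collected into a set, and A's
-- queue-based gravity by rebuilding each column bottom-aligned; same return value, similar cost.


-- 2D-grid helpers shared by both ports (cell read with default / cell write)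
def gC {α : Type} (b : List (List α)) (d : α) (i j : Nat) : α := (b.getD i []).getD j d
def sC {α : Type} (b : List (List α)) (i j : Nat) (v : α) : List (List α) := b.set i ((b.getD i []).set j v)
-- board[i][j] on the input list of strings (exact in range; Pre_ keeps accesses in range)
def pvCharAt (board : List String) (i j : Nat) : String := ((board.getD i "").toList.getD j ' ').toString

-- ===== PORT A =====
-- check_block: inner-loop body (one cell of the DP table), then the nested loops
def pvChkStep (b : List (List String)) (i : Nat) (g : List (List Int)) (j : Nat) : List (List Int) :=
  if gC b "" i j = "" then g
  else if gC b "" (i-1) (j-1) = gC b "" i j ∧ gC b "" i (j-1) = gC b "" i j ∧ gC b "" (i-1) j = gC b "" i j then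
    sC g i j (min (min (gC g 0 (i-1) (j-1)) (gC g 0 i (j-1))) (gC g 0 (i-1) j) + 1)
  else g

def pvCheck (M N : Nat) (b : List (List String)) : List (List Int) :=
  (List.range' 1 (M-1)).foldl (fun g i => (List.range' 1 (N-1)).foldl (pvChkStep b i) g)
    ((List.range M).map (fun _ => List.replicate N (1:Int)))

def pvFour (i j : Nat) : List (Nat × Nat) := [(i-1,j-1),(i-1,j),(i,j-1),(i,j)]

-- the simultaneous assignment board[i-1][j-1], board[i-1][j], board[i][j-1], board[i][j] = "","","",""
def pvBlank4 (b : List (List String)) (i j : Nat) : List (List String) :=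
  sC (sC (sC (sC b (i-1) (j-1) "") (i-1) j "") i (j-1) "") i j ""

def pvRemStep (g : List (List Int)) (i : Nat) (st : List (List String) × List (Nat × Nat)) (j : Nat) :
    List (List String) × List (Nat × Nat) :=
  if 2 ≤ gC g 0 i j then (pvBlank4 st.1 i j, st.2 ++ pvFour i j) else st

def pvRemove (M N : Nat) (b : List (List String)) (g : List (List Int)) :
    List (List String) × List (Nat × Nat) :=
  (List.range' 1 (M-1)).foldl (fun st i => (List.range' 1 (N-1)).foldl (pvRemStep g i) st)
    (b, ([] : List (Nat × Nat)))

-- fill_empty: one iteration of the bottom-up scan (point is the FIFO queue of empty slots)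
def pvFillStep (j : Nat) (b : List (List String)) (point : List (Nat × Nat)) (i : Nat) :
    List (List String) × List (Nat × Nat) :=
  match point with
  | [] => if gC b "" i j = "" then (b, [(i,j)]) else (b, [])
  | (x,y) :: rest =>
    if gC b "" i j = "" then (b, (x,y) :: rest ++ [(i,j)])
    else (sC (sC b x y (gC b "" i j)) i j "", rest ++ [(i,j)])

def pvFillCol (j : Nat) : Nat → List (List String) → List (Nat × Nat) → List (List String)
  | 0, b, _ => b
  | (k+1), b, point =>
    let st := pvFillStep j b point k
    pvFillCol j k st.1 st.2

def pvFill (M N : Nat) (b : List (List String)) : List (List String) :=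
  (List.range N).foldl (fun b j => pvFillCol j M b []) b

def pvCopyA (board : List String) (M N : Nat) : List (List String) :=
  (List.range M).foldl (fun b i =>
    (List.range N).foldl (fun b j => sC b i j (pvCharAt board i j)) b)
    ((List.range M).map (fun _ => List.replicate N ""))

def pvLoopA (M N : Nat) : Nat → List (List String) → Int → Int
  | 0, _, acc => acc
  | (f+1), b, acc =>
    let g := pvCheck M N b
    let st := pvRemove M N b g
    let c : Int := ((PySem.Set.ofList st.2).length : Int)
    if c = 0 then acc
    else pvLoopA M N f (pvFill M N st.1) (acc + c)

def solution (m : Int) (n : Int) (board : List String) : Int :=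
  let M := m.toNat
  let N := n.toNat
  pvLoopA M N (M*N+1) (pvCopyA board M N) 0

-- ===== PORT B =====
def pvClrStep (b : List (List String)) (i : Nat) (s : PySem.Set (Nat × Nat)) (j : Nat) :
    PySem.Set (Nat × Nat) :=
  if gC b "" i j ≠ "" ∧ gC b "" (i-1) j = gC b "" i j ∧ gC b "" i (j-1) = gC b "" i j ∧ gC b "" (i-1) (j-1) = gC b "" i j then
    PySem.Set.add (PySem.Set.add (PySem.Set.add (PySem.Set.add s (i,j)) (i-1,j)) (i,j-1)) (i-1,j-1)
  else s

def pvClear (M N : Nat) (b : List (List String)) : PySem.Set (Nat × Nat) :=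
  (List.range' 1 (M-1)).foldl (fun s i => (List.range' 1 (N-1)).foldl (pvClrStep b i) s)
    PySem.Set.empty

def pvBlank (b : List (List String)) (s : List (Nat × Nat)) : List (List String) :=
  s.foldl (fun b p => sC b p.1 p.2 "") b

def pvGravCol (M : Nat) (b : List (List String)) (j : Nat) : List (List String) :=
  let col := ((List.range M).map (fun i => gC b "" i j)).filter (fun v => v ≠ "")
  let full := List.replicate (M - col.length) "" ++ col
  (List.range M).foldl (fun b i => sC b i j (full.getD i "")) b

def pvGravity (M N : Nat) (b : List (List String)) : List (List String) :=
  (List.range N).foldl (pvGravCol M) b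

def pvGrid (board : List String) (M N : Nat) : List (List String) :=
  (List.range M).map (fun i => (List.range N).map (fun j => pvCharAt board i j))

def pvLoopB (M N : Nat) : Nat → List (List String) → Int → Int
  | 0, _, acc => acc
  | (f+1), b, acc =>
    let s := pvClear M N b
    if s.length = 0 then acc
    else pvLoopB M N f (pvGravity M N (pvBlank b s)) (acc + (s.length : Int))

def solution_alt (m : Int) (n : Int) (board : List String) : Int :=
  let M := m.toNat
  let N := n.toNat
  pvLoopB M N (M*N+1) (pvGrid board M N) 0

-- ===== PRECONDITION & SPEC =====
-- Pre_: exactly the inputs where Python A returns (it raises IndexError when m > len(board)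
-- or one of the first m rows is shorter than n, while m > 0 and n > 0).
def Pre_solution (m : Int) (n : Int) (board : List String) : Prop :=
  (m ≤ 0 ∨ n ≤ 0) ∨ (m ≤ (board.length : Int) ∧ ∀ s ∈ board.take m.toNat, n ≤ (s.toList.length : Int))
instance (m : Int) (n : Int) (board : List String) : Decidable (Pre_solution m n board) := by
  unfold Pre_solution; infer_instance
def pvWitness_solution : Int × Int × List String := (2, 2, ["AB", "AB"])

def Spec_solution (m : Int) (n : Int) (board : List String) (out : Int) : Prop := out = solution_alt m n board
instance (m : Int) (n : Int) (board : List String) (out : Int) : Decidable (Spec_solution m n board out) := by unfold Spec_solution; infer_instance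

-- ===== CLAIM (what is proved, stated in full; the proofs are below) =====
def Claim_equal_solution : Prop := ∀ (m : Int) (n : Int) (board : List String), Dom_solution m n board → Pre_solution m n board → Spec_solution m n board (solution m n board)

-- ===== LEMMAS AND PROOFS =====

-- ---------- basic grid lemmas ----------
theorem pv_getD_set_self {α : Type} (l : List α) (i : Nat) (a d : α) (h : i < l.length) :
    (l.set i a).getD i d = a := by simp [List.getD, h]

theorem pv_getD_set_ne {α : Type} (l : List α) (i x : Nat) (a d : α) (h : x ≠ i) :
    (l.set i a).getD x d = l.getD x d := by simp [List.getD, List.getElem?_set_ne (Ne.symm h)]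

def pvDims {α : Type} (M N : Nat) (b : List (List α)) : Prop :=
  b.length = M ∧ ∀ r ∈ b, r.length = N

theorem pvRowLen {α : Type} {M N : Nat} {b : List (List α)} (h : pvDims M N b) {i : Nat}
    (hi : i < M) : (b.getD i []).length = N := by
  have hib : i < b.length := h.1 ▸ hi
  rw [List.getD_eq_getElem _ _ hib]
  exact h.2 _ (List.getElem_mem hib)

theorem pvDims_sC {α : Type} {M N : Nat} {b : List (List α)} (h : pvDims M N b) {i : Nat}
    (hi : i < M) (j : Nat) (v : α) : pvDims M N (sC b i j v) := by
  constructor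
  · simp [sC, List.length_set, h.1]
  · intro r hr
    rcases List.mem_or_eq_of_mem_set hr with h' | rfl
    · exact h.2 _ h'
    · rw [List.length_set]; exact pvRowLen h hi

theorem gC_sC_self {α : Type} {M N : Nat} {b : List (List α)} (h : pvDims M N b) {i j : Nat}
    (hi : i < M) (hj : j < N) (v d : α) : gC (sC b i j v) d i j = v := by
  unfold gC sC
  rw [pv_getD_set_self _ _ _ _ (h.1 ▸ hi), pv_getD_set_self]
  rw [pvRowLen h hi]; exact hj

theorem gC_sC_ne {α : Type} (b : List (List α)) {i j x y : Nat} (h : x ≠ i ∨ y ≠ j)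
    (v d : α) : gC (sC b i j v) d x y = gC b d x y := by
  unfold gC sC
  by_cases hx : x = i
  · subst hx
    have hy : y ≠ j := h.resolve_left (by simp)
    by_cases hib : x < b.length
    · rw [pv_getD_set_self _ _ _ _ hib, pv_getD_set_ne _ _ _ _ _ hy]
    · rw [List.set_eq_of_length_le (by omega)]
  · rw [pv_getD_set_ne _ _ _ _ _ hx]

theorem pv_eq_of_gC {α : Type} {M N : Nat} {b b' : List (List α)} (d : α)
    (h : pvDims M N b) (h' : pvDims M N b')
    (hp : ∀ x y, x < M → y < N → gC b d x y = gC b' d x y) : b = b' := by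
  apply List.ext_getElem (by rw [h.1, h'.1])
  intro i h1 h2
  have hiM : i < M := h.1 ▸ h1
  apply List.ext_getElem
  · rw [h.2 _ (List.getElem_mem h1), h'.2 _ (List.getElem_mem h2)]
  intro j hj1 hj2
  have hjN : j < N := (h.2 _ (List.getElem_mem h1)) ▸ hj1
  have e := hp i j hiM hjN
  unfold gC at e
  rwa [List.getD_eq_getElem _ _ h1, List.getD_eq_getElem _ _ h2,
    List.getD_eq_getElem _ _ hj1, List.getD_eq_getElem _ _ hj2] at e

theorem pvDims_replicate {α : Type} (M N : Nat) (v : α) :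
    pvDims M N (List.replicate M (List.replicate N v)) := by
  constructor
  · simp
  · intro r hr
    rw [List.eq_of_mem_replicate hr]; simp

theorem gC_replicate {α : Type} {M N x y : Nat} (hx : x < M) (hy : y < N) (v d : α) :
    gC (List.replicate M (List.replicate N v)) d x y = v := by
  unfold gC
  rw [List.getD_replicate _ hx, List.getD_replicate _ hy]

-- ---------- the DP table tests exactly the 2x2 squares ----------
def pvCond (b : List (List String)) (i j : Nat) : Prop :=
  ¬ gC b "" i j = "" ∧ (gC b "" (i-1) (j-1) = gC b "" i j ∧ gC b "" i (j-1) = gC b "" i j ∧ gC b "" (i-1) j = gC b "" i j)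

def pvChkInv (M N : Nat) (b : List (List String)) (S : Nat → Nat → Prop)
    (g : List (List Int)) : Prop :=
  pvDims M N g ∧ (∀ x y, x < M → y < N → 1 ≤ gC g 0 x y) ∧
    (∀ x y, x < M → y < N → (2 ≤ gC g 0 x y ↔ S x y ∧ pvCond b x y))

theorem pvChkInv_congr {M N : Nat} {b : List (List String)} {S S' : Nat → Nat → Prop}
    {g : List (List Int)} (h : pvChkInv M N b S g)
    (hS : ∀ x y, x < M → y < N → (S x y ↔ S' x y)) : pvChkInv M N b S' g := by
  refine ⟨h.1, h.2.1, fun x y hx hy => ?_⟩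
  rw [h.2.2 x y hx hy, and_congr_left_iff]
  intro _; exact hS x y hx hy

theorem pvChkStep_inv {M N : Nat} {b : List (List String)} {S : Nat → Nat → Prop}
    {g : List (List Int)} (h : pvChkInv M N b S g) {i j : Nat}
    (hi : i < M) (hj : j < N) :
    pvChkInv M N b (fun x y => S x y ∨ (x = i ∧ y = j)) (pvChkStep b i g j) := by
  obtain ⟨hd, h1, h2⟩ := h
  unfold pvChkStep
  by_cases he : gC b "" i j = ""
  · rw [if_pos he]
    refine ⟨hd, h1, fun x y hx hy => ?_⟩
    rw [h2 x y hx hy]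
    by_cases hij : x = i ∧ y = j
    · obtain ⟨rfl, rfl⟩ := hij
      constructor
      · rintro ⟨_, hc⟩; exact absurd he hc.1
      · rintro ⟨_, hc⟩; exact absurd he hc.1
    · tauto
  · rw [if_neg he]
    by_cases hq : gC b "" (i-1) (j-1) = gC b "" i j ∧ gC b "" i (j-1) = gC b "" i j ∧ gC b "" (i-1) j = gC b "" i j
    · rw [if_pos hq]
      have hcond : pvCond b i j := ⟨he, hq⟩
      have hval : 2 ≤ min (min (gC g 0 (i-1) (j-1)) (gC g 0 i (j-1))) (gC g 0 (i-1) j) + 1 := by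
        have a1 := h1 (i-1) (j-1) (by omega) (by omega)
        have a2 := h1 i (j-1) hi (by omega)
        have a3 := h1 (i-1) j (by omega) hj
        have : (1:Int) ≤ min (min (gC g 0 (i-1) (j-1)) (gC g 0 i (j-1))) (gC g 0 (i-1) j) :=
          le_min (le_min a1 a2) a3
        omega
      refine ⟨pvDims_sC hd hi _ _, fun x y hx hy => ?_, fun x y hx hy => ?_⟩
      · by_cases hxy : x = i ∧ y = j
        · obtain ⟨rfl, rfl⟩ := hxy
          rw [gC_sC_self hd hx hy]; omega
        · rw [gC_sC_ne g (by tauto)]; exact h1 x y hx hy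
      · by_cases hxy : x = i ∧ y = j
        · obtain ⟨rfl, rfl⟩ := hxy
          rw [gC_sC_self hd hx hy]
          constructor
          · intro _; exact ⟨Or.inr ⟨rfl, rfl⟩, hcond⟩
          · intro _; exact hval
        · rw [gC_sC_ne g (by tauto), h2 x y hx hy]; tauto
    · rw [if_neg hq]
      refine ⟨hd, h1, fun x y hx hy => ?_⟩
      rw [h2 x y hx hy]
      by_cases hxy : x = i ∧ y = j
      · obtain ⟨rfl, rfl⟩ := hxy
        constructor
        · rintro ⟨_, hc⟩; exact absurd hc.2 hq
        · rintro ⟨_, hc⟩; exact absurd hc.2 hq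
      · tauto

theorem pvChk_inner {M N : Nat} {b : List (List String)} {i : Nat} (hi : i < M) :
    ∀ (js : List Nat) (g : List (List Int)) (S : Nat → Nat → Prop),
      (∀ j ∈ js, j < N) → pvChkInv M N b S g →
      pvChkInv M N b (fun x y => S x y ∨ (x = i ∧ y ∈ js)) (js.foldl (pvChkStep b i) g) := by
  intro js
  induction js with
  | nil =>
    intro g S _ h
    simp only [List.foldl_nil]
    exact pvChkInv_congr h (by simp)
  | cons j js ih =>
    intro g S hjs h
    simp only [List.foldl_cons]
    have step := pvChkStep_inv h hi (hjs j (by simp))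
    have := ih _ _ (fun j' hj' => hjs j' (by simp [hj'])) step
    refine pvChkInv_congr this (fun x y _ _ => ?_)
    simp only [List.mem_cons]
    tauto

theorem pvChk_outer {M N : Nat} {b : List (List String)} :
    ∀ (is : List Nat) (g : List (List Int)) (S : Nat → Nat → Prop),
      (∀ i ∈ is, i < M) → pvChkInv M N b S g →
      pvChkInv M N b (fun x y => S x y ∨ (x ∈ is ∧ y ∈ List.range' 1 (N-1)))
        (is.foldl (fun g i => (List.range' 1 (N-1)).foldl (pvChkStep b i) g) g) := by
  intro is
  induction is with
  | nil =>
    intro g S _ h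
    simp only [List.foldl_nil]
    exact pvChkInv_congr h (by simp)
  | cons i is ih =>
    intro g S his h
    simp only [List.foldl_cons]
    have step := pvChk_inner (his i (by simp)) (List.range' 1 (N-1)) g S
      (fun j hj => by
        have := List.mem_range'_1.mp hj; omega) h
    have := ih _ _ (fun i' hi' => his i' (by simp [hi'])) step
    refine pvChkInv_congr this (fun x y _ _ => ?_)
    simp only [List.mem_cons]
    tauto

theorem pvCheck_ge2 {M N : Nat} {b : List (List String)} {i j : Nat}
    (hi1 : 1 ≤ i) (hi : i < M) (hj1 : 1 ≤ j) (hj : j < N) :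
    (2 ≤ gC (pvCheck M N b) 0 i j ↔ pvCond b i j) := by
  have hconv : (List.range M).map (fun _ => List.replicate N (1:Int)) = List.replicate M (List.replicate N (1:Int)) := by
    simp
  have hinit : pvChkInv M N b (fun _ _ => False) ((List.range M).map (fun _ => List.replicate N (1:Int))) := by
    rw [hconv]
    refine ⟨pvDims_replicate M N 1, fun x y hx hy => ?_, fun x y hx hy => ?_⟩
    · rw [gC_replicate hx hy]
    · rw [gC_replicate hx hy]
      constructor
      · omega
      · rintro ⟨h, _⟩; exact h.elim
  have := pvChk_outer (List.range' 1 (M-1)) _ _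
    (fun i' hi' => by have := List.mem_range'_1.mp hi'; omega) hinit
  have hfin := this.2.2 i j hi hj
  unfold pvCheck
  rw [hfin]
  have hmem : i ∈ List.range' 1 (M-1) := List.mem_range'_1.mpr (by omega)
  have hmem' : j ∈ List.range' 1 (N-1) := List.mem_range'_1.mpr (by omega)
  tauto

-- ---------- removal: A blanks during the scan, B blanks a collected set; same cells ----------
def pvInClear (M N : Nat) (b : List (List String)) (p : Nat × Nat) : Prop :=
  ∃ i j, ((1 ≤ i ∧ i < M) ∧ (1 ≤ j ∧ j < N)) ∧ pvCond b i j ∧ p ∈ pvFour i j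

theorem pvInClear_bounds {M N : Nat} {b : List (List String)} {p : Nat × Nat}
    (h : pvInClear M N b p) : p.1 < M ∧ p.2 < N := by
  obtain ⟨i, j, ⟨⟨_, hi⟩, ⟨_, hj⟩⟩, _, hp⟩ := h
  simp only [pvFour, List.mem_cons, List.not_mem_nil, or_false] at hp
  rcases hp with rfl | rfl | rfl | rfl <;> simp <;> omega

theorem pvDims_pvBlank4 {M N : Nat} {b : List (List String)} (h : pvDims M N b) {i j : Nat}
    (hi : i < M) : pvDims M N (pvBlank4 b i j) := by
  unfold pvBlank4
  exact pvDims_sC (pvDims_sC (pvDims_sC (pvDims_sC h (by omega) _ _) (by omega) _ _) hi _ _) hi _ _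

theorem gC_pvBlank4 {M N : Nat} {b : List (List String)} (hd : pvDims M N b) {i j : Nat}
    (hi1 : 1 ≤ i) (hi : i < M) (hj1 : 1 ≤ j) (hj : j < N) (x y : Nat) (hx : x < M) (hy : y < N) :
    gC (pvBlank4 b i j) "" x y = if (x,y) ∈ pvFour i j then "" else gC b "" x y := by
  have d1 : pvDims M N (sC b (i-1) (j-1) "") := pvDims_sC hd (by omega) _ _
  have d2 : pvDims M N (sC (sC b (i-1) (j-1) "") (i-1) j "") := pvDims_sC d1 (by omega) _ _
  have d3 : pvDims M N (sC (sC (sC b (i-1) (j-1) "") (i-1) j "") i (j-1) "") := pvDims_sC d2 hi _ _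
  unfold pvBlank4
  by_cases c1 : x = i ∧ y = j
  · obtain ⟨rfl, rfl⟩ := c1
    rw [gC_sC_self d3 hx hy, if_pos (by simp [pvFour])]
  · rw [gC_sC_ne _ (by tauto)]
    by_cases c2 : x = i ∧ y = j-1
    · obtain ⟨rfl, rfl⟩ := c2
      rw [gC_sC_self d2 hx hy, if_pos (by simp [pvFour])]
    · rw [gC_sC_ne _ (by tauto)]
      by_cases c3 : x = i-1 ∧ y = j
      · obtain ⟨rfl, rfl⟩ := c3
        rw [gC_sC_self d1 hx hy, if_pos (by simp [pvFour])]
      · rw [gC_sC_ne _ (by tauto)]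
        by_cases c4 : x = i-1 ∧ y = j-1
        · obtain ⟨rfl, rfl⟩ := c4
          rw [gC_sC_self hd hx hy, if_pos (by simp [pvFour])]
        · rw [gC_sC_ne _ (by tauto), if_neg]
          simp only [pvFour, List.mem_cons, List.not_mem_nil, or_false, Prod.mk.injEq]
          rintro (⟨h1, h2⟩ | ⟨h1, h2⟩ | ⟨h1, h2⟩ | ⟨h1, h2⟩) <;> tauto

def pvRemInv (M N : Nat) (b : List (List String)) (g : List (List Int))
    (S : Nat → Nat → Prop) (st : List (List String) × List (Nat × Nat)) : Prop :=
  pvDims M N st.1 ∧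
  (∀ p, p ∈ st.2 ↔ ∃ x y, ((1 ≤ x ∧ x < M) ∧ (1 ≤ y ∧ y < N)) ∧ S x y ∧ 2 ≤ gC g 0 x y ∧ p ∈ pvFour x y) ∧
  (∀ x y, x < M → y < N → gC st.1 "" x y = if (x,y) ∈ st.2 then "" else gC b "" x y)

theorem pvRemInv_congr {M N : Nat} {b : List (List String)} {g : List (List Int)}
    {S S' : Nat → Nat → Prop} {st : List (List String) × List (Nat × Nat)}
    (h : pvRemInv M N b g S st) (hS : ∀ x y, S x y ↔ S' x y) : pvRemInv M N b g S' st := by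
  refine ⟨h.1, fun p => ?_, h.2.2⟩
  rw [h.2.1 p]
  constructor
  · rintro ⟨x, y, hb, hs, hrest⟩; exact ⟨x, y, hb, (hS x y).mp hs, hrest⟩
  · rintro ⟨x, y, hb, hs, hrest⟩; exact ⟨x, y, hb, (hS x y).mpr hs, hrest⟩

theorem pvRemStep_inv {M N : Nat} {b : List (List String)} {g : List (List Int)}
    {S : Nat → Nat → Prop} {st : List (List String) × List (Nat × Nat)}
    (h : pvRemInv M N b g S st) {i j : Nat} (hi1 : 1 ≤ i) (hi : i < M) (hj1 : 1 ≤ j) (hj : j < N) :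
    pvRemInv M N b g (fun x y => S x y ∨ (x = i ∧ y = j)) (pvRemStep g i st j) := by
  obtain ⟨hd, hm, hp⟩ := h
  unfold pvRemStep
  by_cases hge : 2 ≤ gC g 0 i j
  · rw [if_pos hge]
    refine ⟨pvDims_pvBlank4 hd hi, fun p => ?_, fun x y hx hy => ?_⟩
    · simp only [List.mem_append]
      constructor
      · rintro (hin | hin)
        · obtain ⟨x, y, hb', hs, hrest⟩ := (hm p).mp hin
          exact ⟨x, y, hb', Or.inl hs, hrest⟩
        · exact ⟨i, j, ⟨⟨hi1, hi⟩, ⟨hj1, hj⟩⟩, Or.inr ⟨rfl, rfl⟩, hge, hin⟩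
      · rintro ⟨x, y, hb', hs | ⟨rfl, rfl⟩, hge', hrest⟩
        · exact Or.inl ((hm p).mpr ⟨x, y, hb', hs, hge', hrest⟩)
        · exact Or.inr hrest
    · rw [gC_pvBlank4 hd hi1 hi hj1 hj x y hx hy, hp x y hx hy]
      simp only [List.mem_append]
      by_cases h4 : (x,y) ∈ pvFour i j
      · rw [if_pos h4, if_pos (Or.inr h4)]
      · rw [if_neg h4]
        by_cases h2 : (x,y) ∈ st.2
        · rw [if_pos h2, if_pos (Or.inl h2)]
        · rw [if_neg h2, if_neg (by tauto)]
  · rw [if_neg hge]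
    refine ⟨hd, fun p => ?_, hp⟩
    rw [hm p]
    constructor
    · rintro ⟨x, y, hb', hs, hrest⟩; exact ⟨x, y, hb', Or.inl hs, hrest⟩
    · rintro ⟨x, y, hb', hs | ⟨rfl, rfl⟩, hge', hrest⟩
      · exact ⟨x, y, hb', hs, hge', hrest⟩
      · exact absurd hge' hge

theorem pvRem_inner {M N : Nat} {b : List (List String)} {g : List (List Int)} {i : Nat}
    (hi1 : 1 ≤ i) (hi : i < M) :
    ∀ (js : List Nat) (st : List (List String) × List (Nat × Nat)) (S : Nat → Nat → Prop),
      (∀ j ∈ js, 1 ≤ j ∧ j < N) → pvRemInv M N b g S st →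
      pvRemInv M N b g (fun x y => S x y ∨ (x = i ∧ y ∈ js)) (js.foldl (pvRemStep g i) st) := by
  intro js
  induction js with
  | nil =>
    intro st S _ h
    simp only [List.foldl_nil]
    exact pvRemInv_congr h (by simp)
  | cons j js ih =>
    intro st S hjs h
    simp only [List.foldl_cons]
    have step := pvRemStep_inv h hi1 hi (hjs j (by simp)).1 (hjs j (by simp)).2
    have := ih _ _ (fun j' hj' => hjs j' (by simp [hj'])) step
    refine pvRemInv_congr this (fun x y => ?_)
    simp only [List.mem_cons]
    tauto

theorem pvRem_outer {M N : Nat} {b : List (List String)} {g : List (List Int)} :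
    ∀ (is : List Nat) (st : List (List String) × List (Nat × Nat)) (S : Nat → Nat → Prop),
      (∀ i ∈ is, 1 ≤ i ∧ i < M) → pvRemInv M N b g S st →
      pvRemInv M N b g (fun x y => S x y ∨ (x ∈ is ∧ y ∈ List.range' 1 (N-1)))
        (is.foldl (fun st i => (List.range' 1 (N-1)).foldl (pvRemStep g i) st) st) := by
  intro is
  induction is with
  | nil =>
    intro st S _ h
    simp only [List.foldl_nil]
    exact pvRemInv_congr h (by simp)
  | cons i is ih =>
    intro st S his h
    simp only [List.foldl_cons]
    have step := pvRem_inner (his i (by simp)).1 (his i (by simp)).2 (List.range' 1 (N-1)) st S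
      (fun j hj => by have := List.mem_range'_1.mp hj; omega) h
    have := ih _ _ (fun i' hi' => his i' (by simp [hi'])) step
    refine pvRemInv_congr this (fun x y => ?_)
    simp only [List.mem_cons]
    tauto

theorem pvRemove_spec {M N : Nat} {b : List (List String)} (hb : pvDims M N b) :
    pvDims M N (pvRemove M N b (pvCheck M N b)).1 ∧
    (∀ p, p ∈ (pvRemove M N b (pvCheck M N b)).2 ↔ pvInClear M N b p) ∧
    (∀ x y, x < M → y < N → gC (pvRemove M N b (pvCheck M N b)).1 "" x y =
      if (x,y) ∈ (pvRemove M N b (pvCheck M N b)).2 then "" else gC b "" x y) := by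
  have hinit : pvRemInv M N b (pvCheck M N b) (fun _ _ => False) (b, []) := by
    refine ⟨hb, fun p => ?_, fun x y hx hy => ?_⟩
    · simp
    · simp
  have hall := pvRem_outer (List.range' 1 (M-1)) (b, []) _
    (fun i hi => by have := List.mem_range'_1.mp hi; omega) hinit
  have hrem : pvRemove M N b (pvCheck M N b) =
      (List.range' 1 (M-1)).foldl
        (fun st i => (List.range' 1 (N-1)).foldl (pvRemStep (pvCheck M N b) i) st) (b, []) := rfl
  rw [← hrem] at hall
  refine ⟨hall.1, fun p => ?_, hall.2.2⟩
  rw [hall.2.1 p]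
  unfold pvInClear
  constructor
  · rintro ⟨x, y, hb', hs, hge, hrest⟩
    exact ⟨x, y, hb', (pvCheck_ge2 hb'.1.1 hb'.1.2 hb'.2.1 hb'.2.2).mp hge, hrest⟩
  · rintro ⟨x, y, hb', hc, hrest⟩
    refine ⟨x, y, hb', ?_, (pvCheck_ge2 hb'.1.1 hb'.1.2 hb'.2.1 hb'.2.2).mpr hc, hrest⟩
    exact Or.inr ⟨List.mem_range'_1.mpr ⟨hb'.1.1, by omega⟩, List.mem_range'_1.mpr ⟨hb'.2.1, by omega⟩⟩

-- ---------- B collects the same set ----------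
def pvClrInv (M N : Nat) (b : List (List String)) (S : Nat → Nat → Prop)
    (s : List (Nat × Nat)) : Prop :=
  s.Nodup ∧ ∀ p, p ∈ s ↔ ∃ x y, ((1 ≤ x ∧ x < M) ∧ (1 ≤ y ∧ y < N)) ∧ S x y ∧ pvCond b x y ∧ p ∈ pvFour x y

theorem pvClrInv_congr {M N : Nat} {b : List (List String)} {S S' : Nat → Nat → Prop}
    {s : List (Nat × Nat)} (h : pvClrInv M N b S s) (hS : ∀ x y, S x y ↔ S' x y) :
    pvClrInv M N b S' s := by
  refine ⟨h.1, fun p => ?_⟩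
  rw [h.2 p]
  constructor
  · rintro ⟨x, y, hb', hs, hrest⟩; exact ⟨x, y, hb', (hS x y).mp hs, hrest⟩
  · rintro ⟨x, y, hb', hs, hrest⟩; exact ⟨x, y, hb', (hS x y).mpr hs, hrest⟩

theorem pvClrStep_inv {M N : Nat} {b : List (List String)} {S : Nat → Nat → Prop}
    {s : List (Nat × Nat)} (h : pvClrInv M N b S s) {i j : Nat}
    (hi1 : 1 ≤ i) (hi : i < M) (hj1 : 1 ≤ j) (hj : j < N) :
    pvClrInv M N b (fun x y => S x y ∨ (x = i ∧ y = j)) (pvClrStep b i s j) := by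
  obtain ⟨hn, hm⟩ := h
  unfold pvClrStep
  split_ifs with hcnd
  · have hcond : pvCond b i j := ⟨hcnd.1, hcnd.2.2.2, hcnd.2.2.1, hcnd.2.1⟩
    refine ⟨?_, fun p => ?_⟩
    · exact PySem.Set.nodup_add _ _ (PySem.Set.nodup_add _ _ (PySem.Set.nodup_add _ _
        (PySem.Set.nodup_add _ _ hn)))
    · simp only [PySem.Set.mem_add]
      constructor
      · rintro ((((hin | rfl) | rfl) | rfl) | rfl)
        · obtain ⟨x, y, hb', hs, hrest⟩ := (hm p).mp hin
          exact ⟨x, y, hb', Or.inl hs, hrest⟩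
        · exact ⟨i, j, ⟨⟨hi1, hi⟩, ⟨hj1, hj⟩⟩, Or.inr ⟨rfl, rfl⟩, hcond, by simp [pvFour]⟩
        · exact ⟨i, j, ⟨⟨hi1, hi⟩, ⟨hj1, hj⟩⟩, Or.inr ⟨rfl, rfl⟩, hcond, by simp [pvFour]⟩
        · exact ⟨i, j, ⟨⟨hi1, hi⟩, ⟨hj1, hj⟩⟩, Or.inr ⟨rfl, rfl⟩, hcond, by simp [pvFour]⟩
        · exact ⟨i, j, ⟨⟨hi1, hi⟩, ⟨hj1, hj⟩⟩, Or.inr ⟨rfl, rfl⟩, hcond, by simp [pvFour]⟩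
      · rintro ⟨x, y, hb', hs | ⟨rfl, rfl⟩, hc, hrest⟩
        · exact Or.inl (Or.inl (Or.inl (Or.inl ((hm p).mpr ⟨x, y, hb', hs, hc, hrest⟩))))
        · simp only [pvFour, List.mem_cons, List.not_mem_nil, or_false] at hrest
          rcases hrest with rfl | rfl | rfl | rfl <;> tauto
  · refine ⟨hn, fun p => ?_⟩
    rw [hm p]
    constructor
    · rintro ⟨x, y, hb', hs, hrest⟩; exact ⟨x, y, hb', Or.inl hs, hrest⟩
    · rintro ⟨x, y, hb', hs | ⟨rfl, rfl⟩, hc, hrest⟩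
      · exact ⟨x, y, hb', hs, hc, hrest⟩
      · exact absurd ⟨hc.1, hc.2.2.2, hc.2.2.1, hc.2.1⟩ hcnd

theorem pvClr_inner {M N : Nat} {b : List (List String)} {i : Nat} (hi1 : 1 ≤ i) (hi : i < M) :
    ∀ (js : List Nat) (s : List (Nat × Nat)) (S : Nat → Nat → Prop),
      (∀ j ∈ js, 1 ≤ j ∧ j < N) → pvClrInv M N b S s →
      pvClrInv M N b (fun x y => S x y ∨ (x = i ∧ y ∈ js)) (js.foldl (pvClrStep b i) s) := by
  intro js
  induction js with
  | nil =>
    intro s S _ h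
    simp only [List.foldl_nil]
    exact pvClrInv_congr h (by simp)
  | cons j js ih =>
    intro s S hjs h
    simp only [List.foldl_cons]
    have step := pvClrStep_inv h hi1 hi (hjs j (by simp)).1 (hjs j (by simp)).2
    have := ih _ _ (fun j' hj' => hjs j' (by simp [hj'])) step
    refine pvClrInv_congr this (fun x y => ?_)
    simp only [List.mem_cons]
    tauto

theorem pvClr_outer {M N : Nat} {b : List (List String)} :
    ∀ (is : List Nat) (s : List (Nat × Nat)) (S : Nat → Nat → Prop),
      (∀ i ∈ is, 1 ≤ i ∧ i < M) → pvClrInv M N b S s →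
      pvClrInv M N b (fun x y => S x y ∨ (x ∈ is ∧ y ∈ List.range' 1 (N-1)))
        (is.foldl (fun s i => (List.range' 1 (N-1)).foldl (pvClrStep b i) s) s) := by
  intro is
  induction is with
  | nil =>
    intro s S _ h
    simp only [List.foldl_nil]
    exact pvClrInv_congr h (by simp)
  | cons i is ih =>
    intro s S his h
    simp only [List.foldl_cons]
    have step := pvClr_inner (his i (by simp)).1 (his i (by simp)).2 (List.range' 1 (N-1)) s S
      (fun j hj => by have := List.mem_range'_1.mp hj; omega) h
    have := ih _ _ (fun i' hi' => his i' (by simp [hi'])) step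
    refine pvClrInv_congr this (fun x y => ?_)
    simp only [List.mem_cons]
    tauto

theorem pvClear_spec {M N : Nat} (b : List (List String)) :
    (pvClear M N b).Nodup ∧ (∀ p, p ∈ pvClear M N b ↔ pvInClear M N b p) := by
  have hinit : pvClrInv M N b (fun _ _ => False) PySem.Set.empty := by
    refine ⟨by simp [PySem.Set.empty], fun p => ?_⟩
    simp [PySem.Set.empty]
  have hall := pvClr_outer (List.range' 1 (M-1)) PySem.Set.empty _
    (fun i hi => by have := List.mem_range'_1.mp hi; omega) hinit
  have hcl : pvClear M N b =
      (List.range' 1 (M-1)).foldl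
        (fun s i => (List.range' 1 (N-1)).foldl (pvClrStep b i) s) PySem.Set.empty := rfl
  rw [← hcl] at hall
  refine ⟨hall.1, fun p => ?_⟩
  rw [hall.2 p]
  unfold pvInClear
  constructor
  · rintro ⟨x, y, hb', _, hrest⟩
    exact ⟨x, y, hb', hrest⟩
  · rintro ⟨x, y, hb', hrest⟩
    refine ⟨x, y, hb', ?_, hrest⟩
    exact Or.inr ⟨List.mem_range'_1.mpr (by omega), List.mem_range'_1.mpr (by omega)⟩

-- ---------- blanking a set of cells (B) ----------
theorem pvBlank_spec {M N : Nat} :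
    ∀ (s : List (Nat × Nat)) (b : List (List String)), pvDims M N b →
      (∀ p ∈ s, p.1 < M ∧ p.2 < N) →
      pvDims M N (pvBlank b s) ∧
      (∀ x y, x < M → y < N → gC (pvBlank b s) "" x y = if (x,y) ∈ s then "" else gC b "" x y) := by
  intro s
  induction s with
  | nil =>
    intro b hb _
    refine ⟨hb, fun x y hx hy => ?_⟩
    simp [pvBlank]
  | cons p s ih =>
    intro b hb hs
    have hp := hs p (by simp)
    have hb' : pvDims M N (sC b p.1 p.2 "") := pvDims_sC hb hp.1 _ _
    have step : pvBlank b (p :: s) = pvBlank (sC b p.1 p.2 "") s := rfl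
    obtain ⟨hd, hg⟩ := ih (sC b p.1 p.2 "") hb' (fun q hq => hs q (by simp [hq]))
    rw [step]
    refine ⟨hd, fun x y hx hy => ?_⟩
    rw [hg x y hx hy]
    by_cases hm : (x,y) ∈ s
    · rw [if_pos hm, if_pos (by simp [hm])]
    · rw [if_neg hm]
      by_cases hpe : (x,y) = p
      · rw [if_pos (by simp [hpe]), ← hpe]
        exact gC_sC_self hb hx hy _ _
      · rw [if_neg (by simp [hpe, hm])]
        refine gC_sC_ne b ?_ _ _
        by_cases h1 : x = p.1
        · right; intro h2; exact hpe (by rw [h1, h2])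
        · left; exact h1

-- ---------- writing a fixed column of values (B's rebuild) ----------
theorem pvWriteCol_spec {M N : Nat} {j : Nat} (hj : j < N) (vals : List String) :
    ∀ (l : List Nat) (b : List (List String)), (∀ i ∈ l, i < M) → pvDims M N b →
      pvDims M N (l.foldl (fun b i => sC b i j (vals.getD i "")) b) ∧
      (∀ x y, x < M → y < N →
        gC (l.foldl (fun b i => sC b i j (vals.getD i "")) b) "" x y =
          if y = j ∧ x ∈ l then vals.getD x "" else gC b "" x y) := by
  intro l
  induction l with
  | nil =>
    intro b _ hb
    refine ⟨hb, fun x y hx hy => ?_⟩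
    simp
  | cons i l ih =>
    intro b hl hb
    have hiM : i < M := hl i (by simp)
    have hb' : pvDims M N (sC b i j (vals.getD i "")) := pvDims_sC hb hiM _ _
    simp only [List.foldl_cons]
    obtain ⟨hd, hg⟩ := ih _ (fun q2 hq => hl q2 (by simp [hq])) hb'
    refine ⟨hd, fun x y hx hy => ?_⟩
    rw [hg x y hx hy]
    by_cases hm : y = j ∧ x ∈ l
    · rw [if_pos hm, if_pos ⟨hm.1, by simp [hm.2]⟩]
    · rw [if_neg hm]
      by_cases hxi : y = j ∧ x = i
      · rw [if_pos ⟨hxi.1, by simp [hxi.2]⟩, hxi.1, hxi.2]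
        exact gC_sC_self hb hiM hj _ _
      · rw [if_neg (by simp only [List.mem_cons]; tauto)]
        exact gC_sC_ne b (by tauto) _ _

theorem pvGravCol_spec {M N : Nat} {b : List (List String)} (hb : pvDims M N b) {j : Nat}
    (hj : j < N) :
    pvDims M N (pvGravCol M b j) ∧
    (∀ x y, x < M → y < N →
      gC (pvGravCol M b j) "" x y =
        if y = j then
          (List.replicate (M - (((List.range M).map (fun i => gC b "" i j)).filter (fun v => v ≠ "")).length) ""
            ++ ((List.range M).map (fun i => gC b "" i j)).filter (fun v => v ≠ "")).getD x ""
        else gC b "" x y) := by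
  have h := pvWriteCol_spec (M := M) hj
    (List.replicate (M - (((List.range M).map (fun i => gC b "" i j)).filter (fun v => v ≠ "")).length) ""
      ++ ((List.range M).map (fun i => gC b "" i j)).filter (fun v => v ≠ ""))
    (List.range M) b (fun i hi => List.mem_range.mp hi) hb
  refine ⟨h.1, fun x y hx hy => ?_⟩
  refine (h.2 x y hx hy).trans ?_
  by_cases hyj : y = j
  · rw [if_pos ⟨hyj, List.mem_range.mpr hx⟩, if_pos hyj]
  · rw [if_neg (by tauto), if_neg hyj]

-- ---------- A's queue gravity produces the bottom-aligned column ----------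
theorem pv_getD_append_left {α : Type} (l1 l2 : List α) (d : α) (x : Nat) (h : x < l1.length) :
    (l1 ++ l2).getD x d = l1.getD x d := by
  simp [List.getD, List.getElem?_append_left h]

def pvPts (k : Nat) : Nat → Nat → List (Nat × Nat)
  | 0, _ => []
  | (t+1), j => (k+t, j) :: pvPts k t j

theorem pvPts_append (k t j : Nat) : pvPts (k+1) t j ++ [(k, j)] = pvPts k (t+1) j := by
  induction t with
  | zero => simp [pvPts]
  | succ t ih =>
    have e : k + 1 + t = k + (t+1) := by omega
    show ((k+1+t, j) :: pvPts (k+1) t j) ++ [(k,j)] = (k+(t+1), j) :: pvPts k (t+1) j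
    rw [List.cons_append, ih, e]

theorem pvFillStep_empty {j : Nat} {b : List (List String)} {k t : Nat}
    (h : gC b "" k j = "") :
    pvFillStep j b (pvPts (k+1) t j) k = (b, pvPts k (t+1) j) := by
  cases t with
  | zero => simp [pvPts, pvFillStep, h]
  | succ s =>
    show pvFillStep j b ((k+1+s, j) :: pvPts (k+1) s j) k = _
    rw [pvFillStep, if_pos h]
    have := pvPts_append k (s+1) j
    rw [show pvPts (k+1) (s+1) j = (k+1+s, j) :: pvPts (k+1) s j from rfl] at this
    rw [show (k+1+s, j) :: pvPts (k+1) s j ++ [(k,j)] = ((k+1+s, j) :: pvPts (k+1) s j) ++ [(k,j)] from rfl, this]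

theorem pv_getD_concat' {α : Type} (l : List α) (a d : α) (n : Nat) (h : l.length = n) :
    (l ++ [a]).getD n d = a := by
  subst h; simp [List.getD]

theorem pvFillCol_inv {M N : Nat} {j : Nat} (hjN : j < N) :
    ∀ (k t : Nat) (b : List (List String)), k + t ≤ M → pvDims M N b →
      (∀ r, k ≤ r → r < k + t → gC b "" r j = "") →
      pvDims M N (pvFillCol j k b (pvPts k t j)) ∧
      (∀ x y, x < M → y < N →
        gC (pvFillCol j k b (pvPts k t j)) "" x y =
          if y = j ∧ x < k + t then
            (List.replicate (k + t - (((List.range k).map (fun r => gC b "" r j)).filter (fun v => v ≠ "")).length) ""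
              ++ ((List.range k).map (fun r => gC b "" r j)).filter (fun v => v ≠ "")).getD x ""
          else gC b "" x y) := by
  intro k
  induction k with
  | zero =>
    intro t b _ hb hemp
    refine ⟨hb, fun x y hx hy => ?_⟩
    rw [show pvFillCol j 0 b (pvPts 0 t j) = b from rfl]
    by_cases hc : y = j ∧ x < 0 + t
    · rw [if_pos hc]
      have hcell : gC b "" x y = "" := by
        rw [hc.1]; exact hemp x (by omega) (by omega)
      rw [hcell]
      simp only [List.range_zero, List.map_nil, List.filter_nil, List.length_nil,
        List.append_nil, Nat.sub_zero]
      rw [List.getD_replicate _ (by omega)]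
    · rw [if_neg hc]
  | succ k ih =>
    intro t b hle hb hemp
    by_cases hcell : gC b "" k j = ""
    · -- the scanned cell is empty: it is queued, nothing moves
      have hred : pvFillCol j (k+1) b (pvPts (k+1) t j) = pvFillCol j k b (pvPts k (t+1) j) := by
        show pvFillCol j k (pvFillStep j b (pvPts (k+1) t j) k).1 (pvFillStep j b (pvPts (k+1) t j) k).2 = _
        rw [pvFillStep_empty hcell]
      have hemp' : ∀ r, k ≤ r → r < k + (t+1) → gC b "" r j = "" := by
        intro r h1 h2
        rcases Nat.eq_or_lt_of_le h1 with rfl | h1'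
        · exact hcell
        · exact hemp r (by omega) (by omega)
      obtain ⟨hd, hg⟩ := ih (t+1) b (by omega) hb hemp'
      have hF : ((List.range (k+1)).map (fun r => gC b "" r j)).filter (fun v => v ≠ "") =
          ((List.range k).map (fun r => gC b "" r j)).filter (fun v => v ≠ "") := by
        rw [List.range_succ, List.map_append, List.filter_append]
        simp [hcell]
      constructor
      · rw [hred]; exact hd
      · intro x y hx hy
        rw [hred, hg x y hx hy, hF]
        have e : k + (t+1) = k + 1 + t := by omega
        rw [e]
    · cases t with
      | zero =>
        -- nonempty cell, empty queue: nothing happens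
        have hred : pvFillCol j (k+1) b (pvPts (k+1) 0 j) = pvFillCol j k b (pvPts k 0 j) := by
          show pvFillCol j k (pvFillStep j b [] k).1 (pvFillStep j b [] k).2 = _
          rw [pvFillStep, if_neg hcell]
          rfl
        obtain ⟨hd, hg⟩ := ih 0 b (by omega) hb (fun r h1 h2 => absurd h2 (by omega))
        have hF : ((List.range (k+1)).map (fun r => gC b "" r j)).filter (fun v => v ≠ "") =
            (((List.range k).map (fun r => gC b "" r j)).filter (fun v => v ≠ "")) ++ [gC b "" k j] := by
          rw [List.range_succ, List.map_append, List.filter_append]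
          simp [hcell]
        have hlen : (((List.range k).map (fun r => gC b "" r j)).filter (fun v => v ≠ "")).length ≤ k := by
          refine le_trans (List.length_filter_le _ _) ?_
          simp
        have hplen : (List.replicate (k + 0 - (((List.range k).map (fun r => gC b "" r j)).filter (fun v => v ≠ "")).length) ""
            ++ ((List.range k).map (fun r => gC b "" r j)).filter (fun v => v ≠ "")).length = k := by
          simp only [List.length_append, List.length_replicate]
          omega
        constructor
        · rw [hred]; exact hd
        · intro x y hx hy
          rw [hred, hg x y hx hy, hF]
          have e : k + 1 + 0 - ((((List.range k).map (fun r => gC b "" r j)).filter (fun v => v ≠ "")) ++ [gC b "" k j]).length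
              = k + 0 - (((List.range k).map (fun r => gC b "" r j)).filter (fun v => v ≠ "")).length := by
            simp only [List.length_append, List.length_singleton]
            omega
          rw [e, ← List.append_assoc]
          by_cases hc1 : y = j ∧ x < k + 0
          · rw [if_pos hc1, if_pos ⟨hc1.1, by omega⟩]
            exact (pv_getD_append_left _ _ _ _ (by rw [hplen]; omega)).symm
          · rw [if_neg hc1]
            by_cases hc2 : y = j ∧ x = k
            · rw [if_pos ⟨hc2.1, by omega⟩, hc2.1, hc2.2]
              exact (pv_getD_concat' _ _ _ _ hplen).symm
            · rw [if_neg (by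
                rintro ⟨hyj, hxk⟩
                rcases Nat.lt_succ_iff_lt_or_eq.mp (by omega : x < k + 1) with h' | h'
                · exact hc1 ⟨hyj, by omega⟩
                · exact hc2 ⟨hyj, h'⟩)]
      | succ s =>
        -- nonempty cell, nonempty queue: it moves to the lowest empty slot
        have hkM : k < M := by omega
        have hsM : k + 1 + s < M := by omega
        have hb1 : pvDims M N (sC b (k+1+s) j (gC b "" k j)) := pvDims_sC hb hsM _ _
        have hb' : pvDims M N (sC (sC b (k+1+s) j (gC b "" k j)) k j "") := pvDims_sC hb1 hkM _ _
        have hstep : pvFillStep j b ((k+1+s, j) :: pvPts (k+1) s j) k =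
            (sC (sC b (k+1+s) j (gC b "" k j)) k j "", pvPts (k+1) s j ++ [(k, j)]) := by
          simp only [pvFillStep]
          rw [if_neg hcell]
        have hred : pvFillCol j (k+1) b (pvPts (k+1) (s+1) j) =
            pvFillCol j k (sC (sC b (k+1+s) j (gC b "" k j)) k j "") (pvPts k (s+1) j) := by
          show pvFillCol j k (pvFillStep j b ((k+1+s, j) :: pvPts (k+1) s j) k).1
              (pvFillStep j b ((k+1+s, j) :: pvPts (k+1) s j) k).2 = _
          rw [hstep, pvPts_append]
        have hemp' : ∀ r, k ≤ r → r < k + (s+1) → gC (sC (sC b (k+1+s) j (gC b "" k j)) k j "") "" r j = "" := by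
          intro r h1 h2
          rcases Nat.eq_or_lt_of_le h1 with rfl | h1'
          · exact gC_sC_self hb1 hkM hjN _ _
          · rw [gC_sC_ne _ (Or.inl (by omega)), gC_sC_ne _ (Or.inl (by omega))]
            exact hemp r (by omega) (by omega)
        obtain ⟨hd, hg⟩ := ih (s+1) (sC (sC b (k+1+s) j (gC b "" k j)) k j "") (by omega) hb' hemp'
        have hFpre : (List.range k).map (fun r => gC (sC (sC b (k+1+s) j (gC b "" k j)) k j "") "" r j) =
            (List.range k).map (fun r => gC b "" r j) := by
          refine List.map_congr_left (fun r hr => ?_)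
          have hrk : r < k := List.mem_range.mp hr
          rw [gC_sC_ne _ (Or.inl (by omega)), gC_sC_ne _ (Or.inl (by omega))]
        have hF : ((List.range (k+1)).map (fun r => gC b "" r j)).filter (fun v => v ≠ "") =
            (((List.range k).map (fun r => gC b "" r j)).filter (fun v => v ≠ "")) ++ [gC b "" k j] := by
          rw [List.range_succ, List.map_append, List.filter_append]
          simp [hcell]
        have hlen : (((List.range k).map (fun r => gC b "" r j)).filter (fun v => v ≠ "")).length ≤ k := by
          refine le_trans (List.length_filter_le _ _) ?_
          simp
        have hplen : (List.replicate (k + (s+1) - (((List.range k).map (fun r => gC b "" r j)).filter (fun v => v ≠ "")).length) ""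
            ++ ((List.range k).map (fun r => gC b "" r j)).filter (fun v => v ≠ "")).length = k + (s+1) := by
          simp only [List.length_append, List.length_replicate]
          omega
        constructor
        · rw [hred]; exact hd
        · intro x y hx hy
          rw [hred, hg x y hx hy, hFpre, hF]
          have e : k + 1 + (s+1) - ((((List.range k).map (fun r => gC b "" r j)).filter (fun v => v ≠ "")) ++ [gC b "" k j]).length
              = k + (s+1) - (((List.range k).map (fun r => gC b "" r j)).filter (fun v => v ≠ "")).length := by
            simp only [List.length_append, List.length_singleton]
            omega
          rw [e, ← List.append_assoc]
          by_cases hc1 : y = j ∧ x < k + (s+1)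
          · rw [if_pos hc1, if_pos ⟨hc1.1, by omega⟩]
            exact (pv_getD_append_left _ _ _ _ (by rw [hplen]; omega)).symm
          · rw [if_neg hc1]
            by_cases hc2 : y = j ∧ x = k + 1 + s
            · rw [if_pos ⟨hc2.1, by omega⟩, hc2.1, hc2.2,
                gC_sC_ne (sC b (k+1+s) j (gC b "" k j)) (Or.inl (by omega)),
                gC_sC_self hb hsM hjN]
              exact (pv_getD_concat' _ _ _ _ (hplen.trans (by omega))).symm
            · rw [if_neg (by
                rintro ⟨hyj, hxk⟩
                rcases Nat.lt_succ_iff_lt_or_eq.mp (by omega : x < (k + (s+1)) + 1) with h' | h'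
                · exact hc1 ⟨hyj, h'⟩
                · exact hc2 ⟨hyj, by omega⟩)]
              by_cases hyj : y = j
              · rw [gC_sC_ne _ (Or.inl (by omega)), gC_sC_ne _ (Or.inl (by omega))]
              · rw [gC_sC_ne _ (Or.inr hyj), gC_sC_ne _ (Or.inr hyj)]

theorem pvFillColFull_eq {M N : Nat} {b : List (List String)} (hb : pvDims M N b) {j : Nat}
    (hj : j < N) : pvFillCol j M b [] = pvGravCol M b j := by
  have hA := pvFillCol_inv (M := M) (N := N) hj M 0 b (by omega) hb
    (fun r h1 h2 => absurd h2 (by omega))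
  have hB := pvGravCol_spec hb hj
  have hpts : pvPts M 0 j = [] := rfl
  rw [hpts] at hA
  refine pv_eq_of_gC "" hA.1 hB.1 (fun x y hx hy => ?_)
  rw [hA.2 x y hx hy, hB.2 x y hx hy]
  by_cases hyj : y = j
  · rw [if_pos ⟨hyj, by omega⟩, if_pos hyj]
    norm_num
  · rw [if_neg (by tauto), if_neg hyj]

theorem pvFill_eq_gravity {M N : Nat} :
    ∀ (l : List Nat) (b : List (List String)), (∀ j ∈ l, j < N) → pvDims M N b →
      pvDims M N (l.foldl (pvGravCol M) b) ∧
      l.foldl (fun b j => pvFillCol j M b []) b = l.foldl (pvGravCol M) b := by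
  intro l
  induction l with
  | nil =>
    intro b _ hb
    exact ⟨hb, rfl⟩
  | cons j l ih =>
    intro b hl hb
    have hj : j < N := hl j (by simp)
    simp only [List.foldl_cons]
    rw [pvFillColFull_eq hb hj]
    exact ih _ (fun q2 hq => hl q2 (by simp [hq])) (pvGravCol_spec hb hj).1

theorem pvFill_eq {M N : Nat} {b : List (List String)} (hb : pvDims M N b) :
    pvFill M N b = pvGravity M N b :=
  (pvFill_eq_gravity (List.range N) b (fun _ hq => List.mem_range.mp hq) hb).2

theorem pvGravity_dims {M N : Nat} {b : List (List String)} (hb : pvDims M N b) :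
    pvDims M N (pvGravity M N b) :=
  (pvFill_eq_gravity (List.range N) b (fun _ hq => List.mem_range.mp hq) hb).1

-- ---------- the initial copies agree ----------
theorem pvGrid_dims (board : List String) (M N : Nat) : pvDims M N (pvGrid board M N) := by
  constructor
  · simp [pvGrid]
  · intro r hr
    simp only [pvGrid, List.mem_map] at hr
    obtain ⟨i, _, rfl⟩ := hr
    simp

theorem gC_pvGrid (board : List String) {M N x y : Nat} (hx : x < M) (hy : y < N) :
    gC (pvGrid board M N) "" x y = pvCharAt board x y := by
  unfold pvGrid gC
  simp [List.getD, hx, hy]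

theorem pvCopy_inner {M N : Nat} (board : List String) {i : Nat} (hi : i < M) :
    ∀ (l : List Nat) (b : List (List String)), (∀ j ∈ l, j < N) → pvDims M N b →
      pvDims M N (l.foldl (fun b j => sC b i j (pvCharAt board i j)) b) ∧
      (∀ x y, x < M → y < N →
        gC (l.foldl (fun b j => sC b i j (pvCharAt board i j)) b) "" x y =
          if x = i ∧ y ∈ l then pvCharAt board i y else gC b "" x y) := by
  intro l
  induction l with
  | nil =>
    intro b _ hb
    refine ⟨hb, fun x y hx hy => ?_⟩
    simp
  | cons j l ih =>
    intro b hl hb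
    have hjN : j < N := hl j (by simp)
    have hb' : pvDims M N (sC b i j (pvCharAt board i j)) := pvDims_sC hb hi _ _
    simp only [List.foldl_cons]
    obtain ⟨hd, hg⟩ := ih _ (fun q2 hq => hl q2 (by simp [hq])) hb'
    refine ⟨hd, fun x y hx hy => ?_⟩
    rw [hg x y hx hy]
    by_cases hm : x = i ∧ y ∈ l
    · rw [if_pos hm, if_pos ⟨hm.1, by simp [hm.2]⟩]
    · rw [if_neg hm]
      by_cases hxi : x = i ∧ y = j
      · rw [if_pos ⟨hxi.1, by simp [hxi.2]⟩, hxi.1, hxi.2]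
        exact gC_sC_self hb hi hjN _ _
      · rw [if_neg (by simp only [List.mem_cons]; tauto)]
        exact gC_sC_ne b (by tauto) _ _

theorem pvCopy_outer {M N : Nat} (board : List String) :
    ∀ (is : List Nat) (b : List (List String)), (∀ i ∈ is, i < M) → pvDims M N b →
      pvDims M N (is.foldl (fun b i => (List.range N).foldl (fun b j => sC b i j (pvCharAt board i j)) b) b) ∧
      (∀ x y, x < M → y < N →
        gC (is.foldl (fun b i => (List.range N).foldl (fun b j => sC b i j (pvCharAt board i j)) b) b) "" x y =
          if x ∈ is then pvCharAt board x y else gC b "" x y) := by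
  intro is
  induction is with
  | nil =>
    intro b _ hb
    refine ⟨hb, fun x y hx hy => ?_⟩
    simp
  | cons i is ih =>
    intro b his hb
    have hiM : i < M := his i (by simp)
    simp only [List.foldl_cons]
    obtain ⟨hd1, hg1⟩ := pvCopy_inner board hiM (List.range N) b (fun _ hq => List.mem_range.mp hq) hb
    obtain ⟨hd, hg⟩ := ih _ (fun q2 hq => his q2 (by simp [hq])) hd1
    refine ⟨hd, fun x y hx hy => ?_⟩
    rw [hg x y hx hy]
    by_cases hm : x ∈ is
    · rw [if_pos hm, if_pos (by simp [hm])]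
    · rw [if_neg hm, hg1 x y hx hy]
      by_cases hxi : x = i
      · rw [if_pos ⟨hxi, List.mem_range.mpr hy⟩, if_pos (by simp [hxi]), hxi]
      · rw [if_neg (by tauto), if_neg (by simp [hxi, hm])]

theorem pvCopyA_eq (board : List String) (M N : Nat) : pvCopyA board M N = pvGrid board M N := by
  have hconv : (List.range M).map (fun _ => List.replicate N "") = List.replicate M (List.replicate N "") := by
    simp
  obtain ⟨hd, hg⟩ := pvCopy_outer (M := M) (N := N) board (List.range M)
    ((List.range M).map (fun _ => List.replicate N "")) (fun _ hq => List.mem_range.mp hq)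
    (by rw [hconv]; exact pvDims_replicate M N "")
  refine pv_eq_of_gC "" hd (pvGrid_dims board M N) (fun x y hx hy => ?_)
  rw [show pvCopyA board M N = (List.range M).foldl
      (fun b i => (List.range N).foldl (fun b j => sC b i j (pvCharAt board i j)) b)
      ((List.range M).map (fun _ => List.replicate N "")) from rfl]
  rw [hg x y hx hy, if_pos (List.mem_range.mpr hx), gC_pvGrid board hx hy]

-- ---------- one round: same count, same board ----------
theorem pvRound_eq {M N : Nat} {b : List (List String)} (hb : pvDims M N b) :
    ((PySem.Set.ofList (pvRemove M N b (pvCheck M N b)).2).length = (pvClear M N b).length) ∧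
    (pvRemove M N b (pvCheck M N b)).1 = pvBlank b (pvClear M N b) ∧
    pvDims M N (pvBlank b (pvClear M N b)) := by
  obtain ⟨hdA, hmA, hgA⟩ := pvRemove_spec hb
  obtain ⟨hnB, hmB⟩ := pvClear_spec (M := M) (N := N) b
  have hbound : ∀ p ∈ pvClear M N b, p.1 < M ∧ p.2 < N :=
    fun p hp => pvInClear_bounds ((hmB p).mp hp)
  obtain ⟨hdB, hgB⟩ := pvBlank_spec (pvClear M N b) b hb hbound
  refine ⟨?_, ?_, hdB⟩
  · have hmm : ∀ p, p ∈ PySem.Set.ofList (pvRemove M N b (pvCheck M N b)).2 ↔ p ∈ pvClear M N b := by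
      intro p
      rw [PySem.Set.mem_ofList]
      exact (hmA p).trans (hmB p).symm
    exact List.Perm.length_eq
      ((List.perm_ext_iff_of_nodup (PySem.Set.nodup_ofList _) hnB).mpr hmm)
  · refine pv_eq_of_gC "" hdA hdB (fun x y hx hy => ?_)
    rw [hgA x y hx hy, hgB x y hx hy]
    by_cases hp : (x,y) ∈ (pvRemove M N b (pvCheck M N b)).2
    · rw [if_pos hp, if_pos ((hmB (x,y)).mpr ((hmA (x,y)).mp hp))]
    · rw [if_neg hp, if_neg (fun hq => hp ((hmA (x,y)).mpr ((hmB (x,y)).mp hq)))]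

-- ---------- the two while-loops agree ----------
theorem pvLoop_eq {M N : Nat} :
    ∀ (f : Nat) (b : List (List String)) (acc : Int), pvDims M N b →
      pvLoopA M N f b acc = pvLoopB M N f b acc := by
  intro f
  induction f with
  | zero => intro b acc _; rfl
  | succ f ih =>
    intro b acc hb
    obtain ⟨hlen, hbd, hdblank⟩ := pvRound_eq hb
    show (if ((PySem.Set.ofList (pvRemove M N b (pvCheck M N b)).2).length : Int) = 0 then acc
        else pvLoopA M N f (pvFill M N (pvRemove M N b (pvCheck M N b)).1)
          (acc + ((PySem.Set.ofList (pvRemove M N b (pvCheck M N b)).2).length : Int))) =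
      (if (pvClear M N b).length = 0 then acc
        else pvLoopB M N f (pvGravity M N (pvBlank b (pvClear M N b)))
          (acc + ((pvClear M N b).length : Int)))
    by_cases hz : (pvClear M N b).length = 0
    · rw [if_pos (by rw [hlen, hz]; norm_num), if_pos hz]
    · rw [if_neg (by rw [hlen]; exact_mod_cast hz), if_neg hz]
      rw [hbd, pvFill_eq hdblank, hlen]
      exact ih _ _ (pvGravity_dims hdblank)

theorem pv_main : ∀ (m : Int) (n : Int) (board : List String),
    solution m n board = solution_alt m n board := by
  intro m n board
  show pvLoopA m.toNat n.toNat (m.toNat * n.toNat + 1) (pvCopyA board m.toNat n.toNat) 0 =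
    pvLoopB m.toNat n.toNat (m.toNat * n.toNat + 1) (pvGrid board m.toNat n.toNat) 0
  rw [pvCopyA_eq]
  exact pvLoop_eq _ _ _ (pvGrid_dims board m.toNat n.toNat)

-- ===== VERDICT (by name: the statement is the Claim_ definition above) =====
theorem solution_spec : Claim_equal_solution := by
  intro m n board _ _
  exact pv_main m n board
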